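-- pv_equiv track=rewrite | github.com/noorulameenkm/DataStructuresAlgorithms | SDE_CHEAT_SHEET/Day 14/largestRectangleInHistogram.py | counts_after
-- ===== SOURCE A (Python) =====
-- def counts_after(index, heights, height, direction):
--     result = 0
--     if direction == 'L':
--         start = index - 1
--         while start >= 0 and heights[start] >= height:
--             result += 1
--             start -= 1
--     elif direction == 'R':
--         start = index + 1
--         while start < len(heights) and heights[start] >= height:
--             result += 1
--             start += 1
--
--     return result
-- ===== SOURCE B (Python) =====
-- # B: list the offsets of all bars in the directional index range that violate the
-- # threshold, then return the first violating offset (or the full range length if none).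
-- def counts_after(index, heights, height, direction):
--     if direction == 'L':
--         idxs = range(index - 1, -1, -1)
--     elif direction == 'R':
--         idxs = range(index + 1, len(heights))
--     else:
--         idxs = range(0)
--     violations = [k for k, j in enumerate(idxs) if heights[j] < height]
--     return violations[0] if violations else len(idxs)
-- ===== Notes on version B (the rewrite author's own statement) =====
-- stated objective: alternative
-- what changed: Replaces A's pointer walk with an early-exit counter by materializing the directional index range, listing the offsets of all violating bars in one full filter pass, and returning the first violating offset (or the range length if none).
import Mathlib
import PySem

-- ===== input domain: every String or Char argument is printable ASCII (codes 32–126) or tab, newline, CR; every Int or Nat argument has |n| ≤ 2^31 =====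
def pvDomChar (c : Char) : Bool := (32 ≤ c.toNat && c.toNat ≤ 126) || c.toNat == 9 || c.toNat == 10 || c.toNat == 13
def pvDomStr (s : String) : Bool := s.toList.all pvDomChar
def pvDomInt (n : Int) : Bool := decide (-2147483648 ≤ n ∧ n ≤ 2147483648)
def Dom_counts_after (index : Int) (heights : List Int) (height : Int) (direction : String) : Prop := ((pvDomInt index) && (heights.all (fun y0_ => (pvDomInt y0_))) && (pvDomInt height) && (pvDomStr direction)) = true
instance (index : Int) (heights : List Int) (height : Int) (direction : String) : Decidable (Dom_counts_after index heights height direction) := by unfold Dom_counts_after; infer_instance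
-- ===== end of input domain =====

-- B lists the offsets of all violating bars in the directional index range and returns the
-- first violating offset (or the range length); objective: alternative decomposition (no
-- pointer walk / early exit), return value only.

-- ===== PORT A =====
-- the 'L' while loop: start walks down while in range and heights[start] >= height
def pvLoopL (heights : List Int) (height : Int) (start result : Int) : Int :=
  if _h : 0 ≤ start then
    match PySem.List.pyGet? heights start with
    | some v => if height ≤ v then pvLoopL heights height (start - 1) (result + 1) else result
    | none => result          -- Python raises IndexError here (excluded by Pre_)
  else result
termination_by (start + 1).toNat
decreasing_by omega

-- the 'R' while loop: start walks up while start < len and heights[start] >= height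
def pvLoopR (heights : List Int) (height : Int) (start result : Int) : Int :=
  if _h : start < (heights.length : Int) then
    match PySem.List.pyGet? heights start with
    | some v => if height ≤ v then pvLoopR heights height (start + 1) (result + 1) else result
    | none => result          -- Python raises IndexError here (excluded by Pre_)
  else result
termination_by ((heights.length : Int) - start).toNat
decreasing_by omega

def counts_after (index : Int) (heights : List Int) (height : Int) (direction : String) : Int :=
  if direction = "L" then pvLoopL heights height (index - 1) 0
  else if direction = "R" then pvLoopR heights height (index + 1) 0
  else 0

-- ===== PORT B =====
-- the comprehension's filter condition: heights[j] < height (none = Python IndexError, excluded by Pre_)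
def pvBad (heights : List Int) (height : Int) (j : Int) : Bool :=
  match PySem.List.pyGet? heights j with
  | some v => decide (v < height)
  | none => false

-- 'violations[0] if violations else len(idxs)'
def pvFirstViol (heights : List Int) (height : Int) (idxs : List Int) : Int :=
  let violations : List Int :=
    ((PySem.List.enumerate idxs 0).filter (fun kj => pvBad heights height kj.2)).map (fun kj => kj.1)
  match violations with
  | v :: _ => v
  | [] => (idxs.length : Int)

def counts_after_alt (index : Int) (heights : List Int) (height : Int) (direction : String) : Int :=
  let idxs : List Int :=
    if direction = "L" then PySem.List.pyRange (index - 1) (-1) (-1)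
    else if direction = "R" then PySem.List.pyRange (index + 1) (heights.length : Int) 1
    else PySem.List.pyRange 0 0 1
  pvFirstViol heights height idxs

-- ===== PRECONDITION & SPEC =====
-- Pre_ excludes exactly the inputs on which the Python A raises IndexError ('L' with
-- index - 1 beyond the right end; 'R' with index + 1 below -len); B raises there too.
def Pre_counts_after (index : Int) (heights : List Int) (height : Int) (direction : String) : Prop :=
  (direction = "L" → index ≤ (heights.length : Int)) ∧
  (direction = "R" → -(heights.length : Int) - 1 ≤ index)
instance (index : Int) (heights : List Int) (height : Int) (direction : String) : Decidable (Pre_counts_after index heights height direction) := by unfold Pre_counts_after; infer_instance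

def pvWitness_counts_after : Int × List Int × Int × String := (0, [], 0, "R")

def Spec_counts_after (index : Int) (heights : List Int) (height : Int) (direction : String) (out : Int) : Prop := out = counts_after_alt index heights height direction
instance (index : Int) (heights : List Int) (height : Int) (direction : String) (out : Int) : Decidable (Spec_counts_after index heights height direction out) := by unfold Spec_counts_after; infer_instance

-- ===== CLAIM =====
def Claim_equal_counts_after : Prop := ∀ (index : Int) (heights : List Int) (height : Int) (direction : String), Dom_counts_after index heights height direction → Pre_counts_after index heights height direction → Spec_counts_after index heights height direction (counts_after index heights height direction)

-- ===== LEMMAS AND PROOFS =====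

-- first violating offset (with default) = length of the violation-free prefix
lemma pvFirstViol_key (bad : Int → Bool) :
    ∀ (js : List Int) (s : Int),
      (match ((PySem.List.enumerate js s).filter (fun kj => bad kj.2)).map (fun kj => kj.1) with
       | v :: _ => v
       | [] => s + (js.length : Int)) =
      s + ((js.takeWhile (fun j => ! bad j)).length : Int) := by
  intro js
  induction js with
  | nil => intro s; simp [PySem.List.enumerate_nil]
  | cons j t ih =>
    intro s
    rw [PySem.List.enumerate_cons]
    by_cases hb : bad j = true
    · simp [hb]
    · have hb' : bad j = false := eq_false_of_ne_true hb
      simp only [List.filter_cons, List.takeWhile_cons, hb', Bool.not_false, Bool.false_eq_true,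
        if_false, if_true]
      have hlen : s + (((j :: t).length : Nat) : Int) = (s + 1) + ((t.length : Nat) : Int) := by
        push_cast [List.length_cons]; ring
      rw [hlen, ih (s + 1)]
      push_cast [List.length_cons]
      ring

lemma pvFirstViol_eq (heights : List Int) (height : Int) (idxs : List Int) :
    pvFirstViol heights height idxs =
      ((idxs.takeWhile (fun j => ! pvBad heights height j)).length : Int) := by
  unfold pvFirstViol
  have := pvFirstViol_key (pvBad heights height) idxs 0
  simpa using this

lemma pvLoopL_eq (heights : List Int) (height : Int) :
    ∀ (start r : Int), start < (heights.length : Int) →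
      pvLoopL heights height start r =
        r + (((PySem.List.pyRange start (-1) (-1)).takeWhile
              (fun j => ! pvBad heights height j)).length : Int) := by
  intro start r hlt
  induction hn : (start + 1).toNat generalizing start r with
  | zero =>
    have hs : start < 0 := by omega
    rw [pvLoopL]
    rw [PySem.List.pyRange_neg_one_eq_nil (by omega : start ≤ -1)]
    simp [show ¬ (0 ≤ start) by omega]
  | succ n ih =>
    have hs : 0 ≤ start := by omega
    rw [pvLoopL, dif_pos hs]
    rw [PySem.List.pyGet?_eq_some_getElem heights hs hlt]
    rw [PySem.List.pyRange_neg_one_cons (by omega : (-1:Int) < start)]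
    have hbad : pvBad heights height start = decide (heights[start.toNat] < height) := by
      unfold pvBad
      rw [PySem.List.pyGet?_eq_some_getElem heights hs hlt]
    by_cases hv : height ≤ heights[start.toNat]
    · have : pvBad heights height start = false := by
        rw [hbad]; simp; omega
      change (if height ≤ heights[start.toNat] then pvLoopL heights height (start - 1) (r + 1) else r) = _
      rw [if_pos hv]
      rw [ih (start - 1) (r + 1) (by omega) (by omega)]
      simp [List.takeWhile, this]
      omega
    · have : pvBad heights height start = true := by
        rw [hbad]; simp; omega
      change (if height ≤ heights[start.toNat] then pvLoopL heights height (start - 1) (r + 1) else r) = _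
      rw [if_neg hv]
      simp [List.takeWhile, this]

lemma pvLoopR_eq (heights : List Int) (height : Int) :
    ∀ (start r : Int), -(heights.length : Int) ≤ start →
      pvLoopR heights height start r =
        r + (((PySem.List.pyRange start (heights.length : Int) 1).takeWhile
              (fun j => ! pvBad heights height j)).length : Int) := by
  intro start r hge
  induction hn : ((heights.length : Int) - start).toNat generalizing start r with
  | zero =>
    have hs : ¬ start < (heights.length : Int) := by omega
    rw [pvLoopR, dif_neg hs]
    rw [PySem.List.pyRange_one_eq_nil (by omega)]
    simp
  | succ n ih =>
    have hs : start < (heights.length : Int) := by omega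
    obtain ⟨v, hv⟩ : ∃ v, PySem.List.pyGet? heights start = some v := by
      cases h : PySem.List.pyGet? heights start with
      | none =>
        rw [PySem.List.pyGet?_eq_none_iff] at h
        exact absurd (by simp [PySem.Raise.InRange]; omega) h
      | some v => exact ⟨v, rfl⟩
    rw [pvLoopR, dif_pos hs, hv]
    rw [PySem.List.pyRange_one_cons hs]
    have hbad : pvBad heights height start = decide (v < height) := by
      unfold pvBad; rw [hv]
    by_cases hcmp : height ≤ v
    · have : pvBad heights height start = false := by rw [hbad]; simp; omega
      change (if height ≤ v then pvLoopR heights height (start + 1) (r + 1) else r) = _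
      rw [if_pos hcmp]
      rw [ih (start + 1) (r + 1) (by omega) (by omega)]
      simp [List.takeWhile, this]
      omega
    · have : pvBad heights height start = true := by rw [hbad]; simp; omega
      change (if height ≤ v then pvLoopR heights height (start + 1) (r + 1) else r) = _
      rw [if_neg hcmp]
      simp [List.takeWhile, this]

-- ===== VERDICT =====
theorem counts_after_spec : Claim_equal_counts_after := by
  intro index heights height direction _ hpre
  obtain ⟨hLpre, hRpre⟩ := hpre
  unfold Spec_counts_after counts_after counts_after_alt
  by_cases hL : direction = "L"
  · rw [if_pos hL, if_pos hL]
    rw [pvFirstViol_eq]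
    rw [pvLoopL_eq heights height (index - 1) 0 (by have := hLpre hL; omega)]
    simp
  · rw [if_neg hL, if_neg hL]
    by_cases hR : direction = "R"
    · rw [if_pos hR, if_pos hR]
      rw [pvFirstViol_eq]
      rw [pvLoopR_eq heights height (index + 1) 0 (by have := hRpre hR; omega)]
      simp
    · rw [if_neg hR, if_neg hR]
      rw [pvFirstViol_eq]
      rw [PySem.List.pyRange_one_eq_nil (by omega)]
      simp
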